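-- pv_equiv track=rewrite | github.com/BTCElectrician/ohmni-oracle-v3 | services/extraction_service.py | _prioritize_plumbing_tables
-- ===== SOURCE A (Python) =====
-- from typing import Dict, List, Any, Optional, Tuple
--
-- def _prioritize_plumbing_tables(
--     tables: List[Dict[str, Any]]
-- ) -> List[Dict[str, Any]]:
--     """Prioritize plumbing tables - fixture schedules first."""
--     # Focus on just a few critical keywords for scoring tables
--     fixture_tables = []
--     equipment_tables = []
--     pipe_tables = []
--     other_tables = []
--
--     for table in tables:
--         content = table.get("content", "").lower()
--
--         # Check for just the most important keywords
--         if any(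
--             term in content for term in ["fixture", "wc", "lav", "sink", "urinal"]
--         ):
--             fixture_tables.append(table)
--         elif any(
--             term in content
--             for term in ["water heater", "pump", "water temperature"]
--         ):
--             equipment_tables.append(table)
--         elif any(term in content for term in ["pipe", "valve", "fitting"]):
--             pipe_tables.append(table)
--         else:
--             other_tables.append(table)
--
--     # Return prioritized tables - most important first
--     return fixture_tables + equipment_tables + pipe_tables + other_tables
-- ===== SOURCE B (Python) =====
-- def _prioritize_plumbing_tables(tables):
--     """Prioritize plumbing tables - fixture schedules first (stable sort by priority)."""
--
--     def _priority(table):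
--         content = table.get("content", "").lower()
--         if any(term in content for term in ["fixture", "wc", "lav", "sink", "urinal"]):
--             return 0
--         if any(term in content for term in ["water heater", "pump", "water temperature"]):
--             return 1
--         if any(term in content for term in ["pipe", "valve", "fitting"]):
--             return 2
--         return 3
--
--     return sorted(tables, key=_priority)
-- ===== Notes on version B (the rewrite author's own statement) =====
-- stated objective: idiomatic
-- what changed: Replaces the four explicit bucket lists and their concatenation by a priority-key function and a single stable sorted() call.
import Mathlib
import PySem

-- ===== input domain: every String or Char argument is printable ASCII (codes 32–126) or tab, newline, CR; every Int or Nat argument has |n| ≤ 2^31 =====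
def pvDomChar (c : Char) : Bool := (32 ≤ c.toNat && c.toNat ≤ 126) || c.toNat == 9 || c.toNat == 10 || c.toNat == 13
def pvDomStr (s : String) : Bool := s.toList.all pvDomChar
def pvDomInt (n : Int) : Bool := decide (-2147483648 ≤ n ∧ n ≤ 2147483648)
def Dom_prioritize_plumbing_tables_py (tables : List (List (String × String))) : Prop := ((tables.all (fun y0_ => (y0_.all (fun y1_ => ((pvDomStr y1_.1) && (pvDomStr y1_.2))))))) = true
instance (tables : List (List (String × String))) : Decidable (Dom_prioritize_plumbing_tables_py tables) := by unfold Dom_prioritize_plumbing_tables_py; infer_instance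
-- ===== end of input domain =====

-- B replaces A's four explicit bucket lists with a priority-key helper and one stable sort (idiomatic; same return value).


-- ===== PORT A =====
-- A's loop body: classify one table into one of the four buckets (fixture, equipment, pipe, other).
def pvStepA (acc : List (List (String × String)) × List (List (String × String)) × List (List (String × String)) × List (List (String × String))) (table : List (String × String)) :
    List (List (String × String)) × List (List (String × String)) × List (List (String × String)) × List (List (String × String)) :=
  let content := PySem.Str.lower (PySem.Dict.getD (PySem.Dict.mk table) "content" "")
  if (["fixture", "wc", "lav", "sink", "urinal"].any (fun term => PySem.Str.isIn term content)) then
    (acc.1 ++ [table], acc.2.1, acc.2.2.1, acc.2.2.2)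
  else if (["water heater", "pump", "water temperature"].any (fun term => PySem.Str.isIn term content)) then
    (acc.1, acc.2.1 ++ [table], acc.2.2.1, acc.2.2.2)
  else if (["pipe", "valve", "fitting"].any (fun term => PySem.Str.isIn term content)) then
    (acc.1, acc.2.1, acc.2.2.1 ++ [table], acc.2.2.2)
  else
    (acc.1, acc.2.1, acc.2.2.1, acc.2.2.2 ++ [table])

-- Literal port of A: one pass appending each table to one of four bucket lists, then concatenation.
def prioritize_plumbing_tables_py (tables : List (List (String × String))) : List (List (String × String)) :=
  let r := tables.foldl pvStepA ([], [], [], [])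
  r.1 ++ r.2.1 ++ r.2.2.1 ++ r.2.2.2

-- ===== PORT B =====
-- B's helper: the priority key (0 fixture, 1 equipment, 2 pipe, 3 other), same elif precedence.
def pvPriority (table : List (String × String)) : Nat :=
  let content := PySem.Str.lower (PySem.Dict.getD (PySem.Dict.mk table) "content" "")
  if (["fixture", "wc", "lav", "sink", "urinal"].any (fun term => PySem.Str.isIn term content)) then 0
  else if (["water heater", "pump", "water temperature"].any (fun term => PySem.Str.isIn term content)) then 1
  else if (["pipe", "valve", "fitting"].any (fun term => PySem.Str.isIn term content)) then 2
  else 3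

def prioritize_plumbing_tables_py_alt (tables : List (List (String × String))) : List (List (String × String)) :=
  PySem.List.sorted tables pvPriority false

-- ===== PRECONDITION & SPEC =====
def Spec_prioritize_plumbing_tables_py (tables : List (List (String × String))) (out : List (List (String × String))) : Prop := out = prioritize_plumbing_tables_py_alt tables
instance (tables : List (List (String × String))) (out : List (List (String × String))) : Decidable (Spec_prioritize_plumbing_tables_py tables out) := by unfold Spec_prioritize_plumbing_tables_py; infer_instance

-- ===== CLAIM (what is proved, stated in full; the proofs are below) =====
def Claim_equal_prioritize_plumbing_tables_py : Prop := ∀ (tables : List (List (String × String))), Dom_prioritize_plumbing_tables_py tables → Spec_prioritize_plumbing_tables_py tables (prioritize_plumbing_tables_py tables)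

-- ===== LEMMAS AND PROOFS =====

theorem pvPriority_le (t : List (String × String)) : pvPriority t ≤ 3 := by
  simp only [pvPriority]; split_ifs <;> omega

-- A's step is exactly "append to the bucket selected by pvPriority"
theorem pvStepA_eq (acc : List (List (String × String)) × List (List (String × String)) × List (List (String × String)) × List (List (String × String))) (t : List (String × String)) :
    pvStepA acc t =
      if pvPriority t = 0 then (acc.1 ++ [t], acc.2.1, acc.2.2.1, acc.2.2.2)
      else if pvPriority t = 1 then (acc.1, acc.2.1 ++ [t], acc.2.2.1, acc.2.2.2)
      else if pvPriority t = 2 then (acc.1, acc.2.1, acc.2.2.1 ++ [t], acc.2.2.2)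
      else (acc.1, acc.2.1, acc.2.2.1, acc.2.2.2 ++ [t]) := by
  simp only [pvStepA, pvPriority]
  split_ifs <;> simp_all

-- inserting x into as ++ bs when x goes after every element of as and before every element of bs
theorem pv_insertBy_mid {α : Type} (before : α → α → Bool) (x : α) (as bs : List α)
    (hA : ∀ a ∈ as, before x a = false) (hB : ∀ b ∈ bs, before x b = true) :
    PySem.List.insertBy before x (as ++ bs) = as ++ x :: bs := by
  induction as with
  | nil =>
    simp only [List.nil_append]
    cases bs with
    | nil => rfl
    | cons b bs' =>
      have hb : before x b = true := hB b (by simp)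
      simp [PySem.List.insertBy, hb]
  | cons a as' ih =>
    have ha : before x a = false := hA a (by simp)
    simp only [List.cons_append, PySem.List.insertBy, ha, Bool.false_eq_true, if_false]
    have := ih (fun a' h => hA a' (by simp [h]))
    simp [this]

-- the loop invariant: A's bucket loop tracks the insertion-sort fold on the concatenation
theorem pv_loop_eq (tables : List (List (String × String)))
    (f e p o : List (List (String × String)))
    (hf : ∀ x ∈ f, pvPriority x = 0) (he : ∀ x ∈ e, pvPriority x = 1)
    (hp : ∀ x ∈ p, pvPriority x = 2) (ho : ∀ x ∈ o, pvPriority x = 3) :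
    (let r := tables.foldl pvStepA (f, e, p, o)
     r.1 ++ r.2.1 ++ r.2.2.1 ++ r.2.2.2)
    = tables.foldl
        (fun acc x => PySem.List.insertBy (fun a b => decide (pvPriority a < pvPriority b)) x acc)
        (f ++ e ++ p ++ o) := by
  induction tables generalizing f e p o with
  | nil => simp
  | cons t rest ih =>
    have hle := pvPriority_le t
    simp only [List.foldl_cons, pvStepA_eq]
    rcases hpv : pvPriority t with _ | _ | _ | _ | n
    · -- priority 0: fixture bucket
      simp only [reduceIte]
      have h1 : PySem.List.insertBy (fun a b => decide (pvPriority a < pvPriority b)) t (f ++ e ++ p ++ o)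
          = (f ++ [t]) ++ e ++ p ++ o := by
        have h2 := pv_insertBy_mid (fun a b => decide (pvPriority a < pvPriority b)) t f (e ++ (p ++ o))
          (by intro a ha; simp [hf a ha, hpv])
          (by intro b hb
              rcases List.mem_append.1 hb with hb | hb
              · simp [he b hb, hpv]
              · rcases List.mem_append.1 hb with hb | hb
                · simp [hp b hb, hpv]
                · simp [ho b hb, hpv])
        calc PySem.List.insertBy (fun a b => decide (pvPriority a < pvPriority b)) t (f ++ e ++ p ++ o)
            = PySem.List.insertBy (fun a b => decide (pvPriority a < pvPriority b)) t (f ++ (e ++ (p ++ o))) := by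
              congr 1; simp
          _ = f ++ t :: (e ++ (p ++ o)) := h2
          _ = (f ++ [t]) ++ e ++ p ++ o := by simp
      rw [h1]
      exact ih (f ++ [t]) e p o
        (by intro x hx; rcases List.mem_append.1 hx with hx | hx
            · exact hf x hx
            · simp at hx; subst hx; exact hpv) he hp ho
    · -- priority 1: equipment bucket
      simp only [reduceIte]
      have h1 : PySem.List.insertBy (fun a b => decide (pvPriority a < pvPriority b)) t (f ++ e ++ p ++ o)
          = f ++ (e ++ [t]) ++ p ++ o := by
        have h2 := pv_insertBy_mid (fun a b => decide (pvPriority a < pvPriority b)) t (f ++ e) (p ++ o)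
          (by intro a ha
              rcases List.mem_append.1 ha with ha | ha
              · simp [hf a ha, hpv]
              · simp [he a ha, hpv])
          (by intro b hb
              rcases List.mem_append.1 hb with hb | hb
              · simp [hp b hb, hpv]
              · simp [ho b hb, hpv])
        calc PySem.List.insertBy (fun a b => decide (pvPriority a < pvPriority b)) t (f ++ e ++ p ++ o)
            = PySem.List.insertBy (fun a b => decide (pvPriority a < pvPriority b)) t ((f ++ e) ++ (p ++ o)) := by
              congr 1; simp
          _ = (f ++ e) ++ t :: (p ++ o) := h2
          _ = f ++ (e ++ [t]) ++ p ++ o := by simp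
      rw [h1]
      exact ih f (e ++ [t]) p o hf
        (by intro x hx; rcases List.mem_append.1 hx with hx | hx
            · exact he x hx
            · simp at hx; subst hx; exact hpv) hp ho
    · -- priority 2: pipe bucket
      simp only [reduceIte]
      have h1 : PySem.List.insertBy (fun a b => decide (pvPriority a < pvPriority b)) t (f ++ e ++ p ++ o)
          = f ++ e ++ (p ++ [t]) ++ o := by
        have h2 := pv_insertBy_mid (fun a b => decide (pvPriority a < pvPriority b)) t (f ++ e ++ p) o
          (by intro a ha
              rcases List.mem_append.1 ha with ha | ha
              · rcases List.mem_append.1 ha with ha | ha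
                · simp [hf a ha, hpv]
                · simp [he a ha, hpv]
              · simp [hp a ha, hpv])
          (by intro b hb; simp [ho b hb, hpv])
        calc PySem.List.insertBy (fun a b => decide (pvPriority a < pvPriority b)) t (f ++ e ++ p ++ o)
            = (f ++ e ++ p) ++ t :: o := h2
          _ = f ++ e ++ (p ++ [t]) ++ o := by simp
      rw [h1]
      exact ih f e (p ++ [t]) o hf he
        (by intro x hx; rcases List.mem_append.1 hx with hx | hx
            · exact hp x hx
            · simp at hx; subst hx; exact hpv) ho
    · -- priority 3: other bucket
      simp only [Nat.reduceAdd]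
      have h1 : PySem.List.insertBy (fun a b => decide (pvPriority a < pvPriority b)) t (f ++ e ++ p ++ o)
          = f ++ e ++ p ++ (o ++ [t]) := by
        have h2 := PySem.List.insertBy_of_forall_not_before (fun a b => decide (pvPriority a < pvPriority b)) t (f ++ e ++ p ++ o)
          (by intro a ha
              rcases List.mem_append.1 ha with ha | ha
              · rcases List.mem_append.1 ha with ha | ha
                · rcases List.mem_append.1 ha with ha | ha
                  · simp [hf a ha, hpv]
                  · simp [he a ha, hpv]
                · simp [hp a ha, hpv]
              · simp [ho a ha, hpv])
        rw [h2]; simp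
      rw [h1]
      exact ih f e p (o ++ [t]) hf he hp
        (by intro x hx; rcases List.mem_append.1 hx with hx | hx
            · exact ho x hx
            · simp at hx; subst hx; exact hpv)
    · omega

-- ===== VERDICT (by name: the statement is the Claim_ definition above) =====
theorem prioritize_plumbing_tables_py_spec : Claim_equal_prioritize_plumbing_tables_py := by
  intro tables _
  show prioritize_plumbing_tables_py tables = prioritize_plumbing_tables_py_alt tables
  unfold prioritize_plumbing_tables_py prioritize_plumbing_tables_py_alt
  rw [PySem.List.sorted_eq_foldl_insertBy]
  simpa using pv_loop_eq tables [] [] [] [] (by simp) (by simp) (by simp) (by simp)
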